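-- pv_equiv track=rewrite | github.com/HansHoogerwerf/41 | len/main.py | findPosibilities
-- ===== SOURCE A (Python) =====
-- def findPosibility(boord, position, touchedplaces):
--     positions = []
--     check = touchedplaces[position[0]][position[1]]
--     if check == False and boord[position[0]][position[1]] != " ":
--         positions.append(position)
--         touchedplaces[position[0]][position[1]] = True
--         #bottom check
--         #bounds check
--         if(len(touchedplaces) > position[0] + 1):
--             # check if not touched
--             if(touchedplaces[position[0] + 1][position[1]] == False):
--                 # check if the same
--                 if(boord[position[0]][position[1]] == boord[position[0] + 1][position[1]]):
--                     positions = positions + (findPosibility(boord, ((position[0] + 1), position[1]), touchedplaces))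
--         #right check
--         #bounds check
--         if(len(touchedplaces[0]) > position[1] + 1):
--             # check if not touched
--             if(touchedplaces[position[0]][position[1] + 1] == False):
--                 # check if the same
--                 if(boord[position[0]][position[1]] == boord[position[0]][position[1] + 1]):
--                     positions = positions + (findPosibility(boord, ((position[0]), position[1] + 1), touchedplaces))
--         # left check
--         if(position[1] - 1 >= 0):
--             # check if not touched
--             if(touchedplaces[position[0]][position[1] - 1] == False):
--                 # check if the same
--                 if(boord[position[0]][position[1]] == boord[position[0]][position[1] - 1]):
--                     positions = positions + (findPosibility(boord, ((position[0]), position[1] - 1), touchedplaces))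
--         #top check
--         if(position[0] - 1 >= 0):
--             if(touchedplaces[position[0] - 1][position[1]] == False):
--                 # check if the same
--                 if(boord[position[0]][position[1]] == boord[position[0] - 1][position[1]]):
--                     positions = positions + (findPosibility(boord, ((position[0] - 1), position[1]), touchedplaces))
--         return positions
--     else:
--         return positions
--
-- def findPosibilities(boord, letter):
--     posibilties = []
--     touchedPlaces = []
--     for i in range(0, len(boord)):
--         touchedPlaces.append([])
--     for i in range(0, len(touchedPlaces)):
--         for j in range(0, len(boord[0])):
--             touchedPlaces[i].append(False)
--     for i in range(0, len(boord)):
--         for j in range(0, len(boord[i])):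
--             posibilty = findPosibility(boord, (i,j), touchedPlaces)
--             if(len(posibilty) > 1):
--                 posibilties.append(posibilty)
--     return posibilties
-- ===== SOURCE B (Python) =====
-- def findPosibilities(boord, letter):
--     rows = len(boord)
--     width = len(boord[0]) if boord else 0
--     touched = [[False] * width for _ in range(rows)]
--     result = []
--     for i in range(rows):
--         for j in range(len(boord[i])):
--             comp = []
--             stack = [(i, j)]
--             while stack:
--                 r, c = stack.pop()
--                 if touched[r][c] or boord[r][c] == " ":
--                     continue
--                 touched[r][c] = True
--                 comp.append((r, c))
--                 ch = boord[r][c]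
--                 # push in reverse of the recursion's order so bottom is explored first
--                 if r - 1 >= 0 and not touched[r - 1][c] and boord[r - 1][c] == ch:
--                     stack.append((r - 1, c))
--                 if c - 1 >= 0 and not touched[r][c - 1] and boord[r][c - 1] == ch:
--                     stack.append((r, c - 1))
--                 if c + 1 < width and not touched[r][c + 1] and boord[r][c + 1] == ch:
--                     stack.append((r, c + 1))
--                 if r + 1 < rows and not touched[r + 1][c] and boord[r + 1][c] == ch:
--                     stack.append((r + 1, c))
--             if len(comp) > 1:
--                 result.append(comp)
--     return result
-- ===== Notes on version B (the rewrite author's own statement) =====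
-- stated objective: faster
-- what changed: findPosibility's recursive DFS (four guarded recursive calls concatenating sublists via positions + positions) is replaced by an iterative DFS with an explicit stack that pushes neighbours in reverse order and re-checks touched/space at pop time, producing the same preorder with cheap appends and no recursion.
-- outside the precondition, e.g. on findPosibilities([['a', ' '], [' ']], 'x'): A returns [], B returns []
import Mathlib
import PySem

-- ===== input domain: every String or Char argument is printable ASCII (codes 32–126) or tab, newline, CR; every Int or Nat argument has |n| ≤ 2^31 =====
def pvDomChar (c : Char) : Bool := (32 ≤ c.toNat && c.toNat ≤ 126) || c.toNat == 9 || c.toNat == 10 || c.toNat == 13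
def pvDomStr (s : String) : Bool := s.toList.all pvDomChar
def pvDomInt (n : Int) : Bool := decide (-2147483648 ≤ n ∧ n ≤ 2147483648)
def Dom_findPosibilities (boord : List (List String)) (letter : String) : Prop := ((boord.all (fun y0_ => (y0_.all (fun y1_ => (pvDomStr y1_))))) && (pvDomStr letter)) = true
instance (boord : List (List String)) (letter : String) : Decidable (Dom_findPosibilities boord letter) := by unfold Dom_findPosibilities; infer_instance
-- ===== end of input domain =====

-- B rewrites the recursive flood fill `findPosibility` as an iterative DFS with an explicit
-- stack (same preorder, same touched-marking discipline); the return value is proved equal on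
-- rectangular boards.  A mutates no argument observably (`touchedPlaces` is local).

-- ===== PORT A =====
-- shared grid primitives (Python `g[i][j]`, `g[i][j] = True`, counting untouched cells)
def getG {α : Type} (g : List (List α)) (p : Int × Int) : Option α :=
  (PySem.List.pyGet? g p.1).bind (fun row => PySem.List.pyGet? row p.2)

def markG (t : List (List Bool)) (p : Int × Int) : List (List Bool) :=
  PySem.List.pySetD t p.1 (PySem.List.pySetD (PySem.List.pyGetD t p.1 []) p.2 true)

def falseCount (t : List (List Bool)) : Nat :=
  (t.map (fun r => r.countP (fun b => b == false))).sum

theorem pyResolve {α : Type} (xs : List α) (i : Int) (x : α)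
    (h : PySem.List.pyGet? xs i = some x) :
    ∃ k : Nat, k < xs.length ∧ xs[k]? = some x ∧
      (∀ v, PySem.List.pySetD xs i v = xs.set k v) ∧ (∀ d, PySem.List.pyGetD xs i d = x) := by
  unfold PySem.List.pyGet? at h
  cases hk : PySem.List.pyIdx? xs.length i with
  | none => rw [hk] at h; simp at h
  | some k =>
    rw [hk] at h; simp at h
    refine ⟨k, ?_, h, ?_, ?_⟩
    · exact (List.getElem?_eq_some_iff.mp h).1
    · intro v
      simp [PySem.List.pySetD, PySem.List.pySet?, hk]
    · intro d
      simp [PySem.List.pyGetD, PySem.List.pyGet?, hk, h]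

-- cited by the termination argument of `runB` and by the fuel-adequacy lemmas below
theorem falseCount_markG_lt (t : List (List Bool)) (p : Int × Int)
    (h : getG t p = some false) : falseCount (markG t p) < falseCount t := by
  unfold getG at h
  cases hrow : PySem.List.pyGet? t p.1 with
  | none => rw [hrow] at h; simp at h
  | some row =>
    rw [hrow] at h; simp at h
    obtain ⟨k, hk, hget, hset, hgetD⟩ := pyResolve t p.1 row hrow
    obtain ⟨c, hc, hgetc, hsetc, _⟩ := pyResolve row p.2 false h
    unfold markG falseCount
    rw [hgetD, hsetc, hset, List.map_set]
    have hrowget : row[c] = false := by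
      have := List.getElem?_eq_some_iff.mp hgetc; exact this.2
    have hcount : (row.set c true).countP (fun b => b == false) + 1 = row.countP (fun b => b == false) := by
      rw [List.countP_set hc, hrowget]
      simp only [beq_self_eq_true, if_true, show ((true == false) = true) = False by simp, if_false]
      have hpos : 0 < row.countP (fun b => b == false) := by
        exact List.countP_pos_iff.mpr ⟨false, List.mem_of_getElem? hgetc, by simp⟩
      omega
    set m := t.map (fun r => r.countP (fun b => b == false)) with hm
    have hklen : k < m.length := by simp [hm, hk]
    have hmk : m[k] = row.countP (fun b => b == false) := by
      simp [hm]
      have := List.getElem?_eq_some_iff.mp hget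
      rw [this.2]
    rw [List.sum_set]
    conv_rhs => rw [← List.set_getElem_self (as := m) (i := k) hklen, List.sum_set]
    simp only [hklen, if_true, hmk, hcount.symm]
    omega

-- one guarded neighbour step of `findPosibility`: bounds check, touched check, same-letter
-- check, then `positions = positions + findPosibility(...)` on the current touched grid
def vstage (boord : List (List String))
    (f : List (List Bool) → Int × Int → List (Int × Int) × List (List Bool))
    (p q : Int × Int) (bnd : List (List Bool) → Prop) [∀ tc, Decidable (bnd tc)]
    (st : List (Int × Int) × List (List Bool)) : List (Int × Int) × List (List Bool) :=
  if bnd st.2 ∧ getG st.2 q = some false ∧ getG boord p = getG boord q then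
    (st.1 ++ (f st.2 q).1, (f st.2 q).2)
  else st

-- `findPosibility`, with a fuel counter as totality guard (each visit marks one untouched
-- cell, so `falseCount` strictly decreases and the fuel `falseCount t` never runs out)
def visitAF (boord : List (List String)) : Nat → List (List Bool) → Int × Int → List (Int × Int) × List (List Bool)
  | 0, t, _ => ([], t)
  | n + 1, t, p =>
    if getG t p = some false ∧ getG boord p ≠ some " " then
      vstage boord (visitAF boord n) p (p.1 - 1, p.2) (fun _ => p.1 - 1 ≥ 0)
        (vstage boord (visitAF boord n) p (p.1, p.2 - 1) (fun _ => p.2 - 1 ≥ 0)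
          (vstage boord (visitAF boord n) p (p.1, p.2 + 1) (fun tc => ((tc.headD []).length : Int) > p.2 + 1)
            (vstage boord (visitAF boord n) p (p.1 + 1, p.2) (fun tc => ((tc.length : Int)) > p.1 + 1)
              ([p], markG t p))))
    else ([], t)

def visitA (boord : List (List String)) (t : List (List Bool)) (p : Int × Int) :
    List (Int × Int) × List (List Bool) :=
  visitAF boord (falseCount t) t p

def findPosibilities (boord : List (List String)) (letter : String) : List (List (Int × Int)) :=
  let touched0 : List (List Bool) := boord.map (fun _ => (boord.headD []).map (fun _ => false))
  ((PySem.List.pyRange 0 (boord.length : Int) 1).foldl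
    (fun st i =>
      (PySem.List.pyRange 0 (((PySem.List.pyGetD boord i []).length : Int)) 1).foldl
        (fun st2 j =>
          let pr := visitA boord st2.2 (i, j)
          (if pr.1.length > 1 then st2.1 ++ [pr.1] else st2.1, pr.2)) st)
    ([], touched0)).1

-- ===== PORT B =====
def pushIf (c : Prop) [Decidable c] (q : Int × Int) : List (Int × Int) :=
  if c then [q] else []

theorem length_pushIf (c : Prop) [Decidable c] (q : Int × Int) : (pushIf c q).length ≤ 1 := by
  unfold pushIf; split <;> simp

-- the explicit-stack DFS loop of Source B (`while stack: ...`); out-of-range lookups (Python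
-- IndexError, outside Pre_) are skipped to keep the function total
def runB (boord : List (List String)) (rows width : Int) (t : List (List Bool))
    (stack : List (Int × Int)) (acc : List (Int × Int)) : List (Int × Int) × List (List Bool) :=
  match stack with
  | [] => (acc, t)
  | p :: s =>
    if hc : getG t p = some false then
      match getG boord p with
      | none => runB boord rows width t s acc
      | some ch =>
        if ch = " " then runB boord rows width t s acc
        else
          let t1 := markG t p
          let ns :=
            pushIf (p.1 + 1 < rows ∧ getG t1 (p.1 + 1, p.2) = some false ∧ getG boord (p.1 + 1, p.2) = some ch) (p.1 + 1, p.2) ++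
            pushIf (p.2 + 1 < width ∧ getG t1 (p.1, p.2 + 1) = some false ∧ getG boord (p.1, p.2 + 1) = some ch) (p.1, p.2 + 1) ++
            pushIf (p.2 - 1 ≥ 0 ∧ getG t1 (p.1, p.2 - 1) = some false ∧ getG boord (p.1, p.2 - 1) = some ch) (p.1, p.2 - 1) ++
            pushIf (p.1 - 1 ≥ 0 ∧ getG t1 (p.1 - 1, p.2) = some false ∧ getG boord (p.1 - 1, p.2) = some ch) (p.1 - 1, p.2)
          runB boord rows width t1 (ns ++ s) (acc ++ [p])
    else runB boord rows width t s acc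
termination_by 5 * falseCount t + stack.length
decreasing_by
  all_goals simp only [List.length_append, List.length_cons]
  all_goals try omega
  have hlt := falseCount_markG_lt t p hc
  have h1 := length_pushIf (p.1 + 1 < rows ∧ getG (markG t p) (p.1 + 1, p.2) = some false ∧ getG boord (p.1 + 1, p.2) = some ch) (p.1 + 1, p.2)
  have h2 := length_pushIf (p.2 + 1 < width ∧ getG (markG t p) (p.1, p.2 + 1) = some false ∧ getG boord (p.1, p.2 + 1) = some ch) (p.1, p.2 + 1)
  have h3 := length_pushIf (p.2 - 1 ≥ 0 ∧ getG (markG t p) (p.1, p.2 - 1) = some false ∧ getG boord (p.1, p.2 - 1) = some ch) (p.1, p.2 - 1)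
  have h4 := length_pushIf (p.1 - 1 ≥ 0 ∧ getG (markG t p) (p.1 - 1, p.2) = some false ∧ getG boord (p.1 - 1, p.2) = some ch) (p.1 - 1, p.2)
  omega

def findPosibilities_alt (boord : List (List String)) (letter : String) : List (List (Int × Int)) :=
  let rows : Int := boord.length
  let width : Int := (boord.headD []).length
  let touched0 : List (List Bool) := boord.map (fun _ => List.replicate (boord.headD []).length false)
  ((PySem.List.pyRange 0 rows 1).foldl
    (fun st i =>
      (PySem.List.pyRange 0 (((PySem.List.pyGetD boord i []).length : Int)) 1).foldl
        (fun st2 j =>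
          let pr := runB boord rows width st2.2 [(i, j)] []
          (if pr.1.length > 1 then st2.1 ++ [pr.1] else st2.1, pr.2)) st)
    ([], touched0)).1

-- ===== PRECONDITION & SPEC =====
-- Pre_ excludes ragged boards (a row longer or shorter than row 0): A sizes its `touchedPlaces`
-- matrix by row 0, so on ragged boards it raises IndexError except on degenerate corners
-- (all relevant cells blank) where its empty result is an accident of that matrix.
def Pre_findPosibilities (boord : List (List String)) (letter : String) : Prop :=
  ∀ row ∈ boord, row.length = (boord.headD []).length
instance (boord : List (List String)) (letter : String) : Decidable (Pre_findPosibilities boord letter) := by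
  unfold Pre_findPosibilities; infer_instance

def pvWitness_findPosibilities : List (List String) × String := ([["a", "a"], ["b", "a"]], "a")

def Spec_findPosibilities (boord : List (List String)) (letter : String) (out : List (List (Int × Int))) : Prop := out = findPosibilities_alt boord letter
instance (boord : List (List String)) (letter : String) (out : List (List (Int × Int))) : Decidable (Spec_findPosibilities boord letter out) := by unfold Spec_findPosibilities; infer_instance

-- ===== CLAIM (what is proved, stated in full; the proofs are below) =====
def Claim_equal_findPosibilities : Prop := ∀ (boord : List (List String)) (letter : String), Dom_findPosibilities boord letter → Pre_findPosibilities boord letter → Spec_findPosibilities boord letter (findPosibilities boord letter)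

theorem pyIdx_lt (n : Nat) (i : Int) (k : Nat) (h : PySem.List.pyIdx? n i = some k) : k < n := by
  unfold PySem.List.pyIdx? at h
  split_ifs at h <;> simp_all <;> omega

theorem pyGet?_set_of_lt {α : Type} (xs : List α) (k : Nat) (hk : k < xs.length) (v : α) (i : Int) :
    PySem.List.pyGet? (xs.set k v) i =
      if PySem.List.pyIdx? xs.length i = some k then some v else PySem.List.pyGet? xs i := by
  unfold PySem.List.pyGet?
  rw [List.length_set]
  cases hi : PySem.List.pyIdx? xs.length i with
  | none => simp [hi]
  | some m =>
    simp only [hi, Option.bind_some]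
    rw [List.getElem?_set]
    by_cases hmk : m = k
    · subst hmk; simp [hk]
    · simp [hmk, Ne.symm hmk]

theorem getG_false_pos (t : List (List Bool)) (p : Int × Int)
    (h : getG t p = some false) : 0 < falseCount t := by
  unfold getG at h
  cases hrow : PySem.List.pyGet? t p.1 with
  | none => rw [hrow] at h; simp at h
  | some row =>
    rw [hrow] at h; simp at h
    have hmemrow : row ∈ t := PySem.List.mem_of_pyGet?_eq_some t hrow
    have hmemf : false ∈ row := PySem.List.mem_of_pyGet?_eq_some row h
    have hpos : 0 < row.countP (fun b => b == false) :=
      List.countP_pos_iff.mpr ⟨false, hmemf, by simp⟩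
    have hle : row.countP (fun b => b == false) ≤ falseCount t := by
      apply List.single_le_sum (by intro x _; exact Nat.zero_le x)
      exact List.mem_map.mpr ⟨row, hmemrow, rfl⟩
    omega

theorem shape_length {α β : Type} {t : List (List α)} {g : List (List β)}
    (h : t.map List.length = g.map List.length) : t.length = g.length := by
  have := congrArg List.length h; simpa using this

theorem shape_headD {α β : Type} {t : List (List α)} {g : List (List β)}
    (h : t.map List.length = g.map List.length) : (t.headD []).length = (g.headD []).length := by
  cases t <;> cases g <;> simp_all

theorem pyGet?_eq_some_pyIdx {α : Type} {xs : List α} {i : Int} {x : α}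
    (h : PySem.List.pyGet? xs i = some x) :
    ∃ k : Nat, PySem.List.pyIdx? xs.length i = some k ∧ k < xs.length ∧ xs[k]? = some x := by
  unfold PySem.List.pyGet? at h
  cases hk : PySem.List.pyIdx? xs.length i with
  | none => rw [hk] at h; simp at h
  | some k =>
    rw [hk] at h; simp at h
    exact ⟨k, rfl, (List.getElem?_eq_some_iff.mp h).1, h⟩

theorem pyGet?_none_iff_len {α β : Type} {xs : List α} {ys : List β} (h : xs.length = ys.length)
    (i : Int) : PySem.List.pyGet? xs i = none ↔ PySem.List.pyGet? ys i = none := by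
  rw [PySem.List.pyGet?_eq_none_iff, PySem.List.pyGet?_eq_none_iff, h]

theorem getG_none_iff {α β : Type} {t : List (List α)} {g : List (List β)}
    (h : t.map List.length = g.map List.length) (x : Int × Int) :
    (getG t x = none ↔ getG g x = none) := by
  have hlen : t.length = g.length := shape_length h
  unfold getG
  cases h1 : PySem.List.pyGet? t x.1 with
  | none =>
    have h1' : PySem.List.pyGet? g x.1 = none := (pyGet?_none_iff_len hlen x.1).mp h1
    simp [h1, h1']
  | some rowt =>
    cases h2 : PySem.List.pyGet? g x.1 with
    | none =>
      rw [(pyGet?_none_iff_len hlen x.1).mpr h2] at h1; simp at h1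
    | some rowg =>
      obtain ⟨k, hik, hk, hgetk⟩ := pyGet?_eq_some_pyIdx h1
      obtain ⟨k', hik', hk', hgetk'⟩ := pyGet?_eq_some_pyIdx h2
      have hkk : k = k' := by rw [← hlen] at hik'; rw [hik] at hik'; exact Option.some.inj hik'
      subst hkk
      have hrowt : rowt = t[k] := by
        have := List.getElem?_eq_some_iff.mp hgetk; exact this.2.symm
      have hrowg : rowg = g[k] := by
        have := List.getElem?_eq_some_iff.mp hgetk'; exact this.2.symm
      have hrl : rowt.length = rowg.length := by
        have h2' := congrArg (fun l => l[k]?) h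
        simp only [List.getElem?_map, List.getElem?_eq_getElem, hk, hk'] at h2'
        rw [hrowt, hrowg]
        simpa using h2'
      simp only [Option.bind_some]
      rw [PySem.List.pyGet?_eq_none_iff, PySem.List.pyGet?_eq_none_iff, hrl]

theorem getG_some_of_shape {α β : Type} {t : List (List α)} {g : List (List β)}
    (h : t.map List.length = g.map List.length) {x : Int × Int} {b : α}
    (hc : getG t x = some b) : ∃ y, getG g x = some y := by
  cases hg : getG g x with
  | none => rw [(getG_none_iff h x).mpr hg] at hc; simp at hc
  | some y => exact ⟨y, rfl⟩

theorem markG_of_none (t : List (List Bool)) (p : Int × Int)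
    (hi : PySem.List.pyIdx? t.length p.1 = none) : markG t p = t := by
  unfold markG PySem.List.pySetD PySem.List.pySet?
  rw [hi]; rfl

theorem markG_of_some (t : List (List Bool)) (p : Int × Int) (k : Nat)
    (hi : PySem.List.pyIdx? t.length p.1 = some k) :
    markG t p = t.set k (PySem.List.pySetD (t.getD k []) p.2 true) := by
  have hk := pyIdx_lt _ _ _ hi
  unfold markG PySem.List.pySetD PySem.List.pySet? PySem.List.pyGetD PySem.List.pyGet?
  rw [hi]
  simp [List.getElem?_eq_getElem, hk, List.getD_eq_getElem?_getD]

theorem markG_shape (t : List (List Bool)) (p : Int × Int) :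
    (markG t p).map List.length = t.map List.length := by
  cases hi : PySem.List.pyIdx? t.length p.1 with
  | none => rw [markG_of_none t p hi]
  | some k =>
    have hk := pyIdx_lt _ _ _ hi
    rw [markG_of_some t p k hi, List.map_set]
    rw [PySem.List.length_pySetD]
    have : (t.getD k []).length = t[k].length := by
      rw [List.getD_eq_getElem?_getD, List.getElem?_eq_getElem hk]; rfl
    rw [this]
    have hk2 : k < (t.map List.length).length := by simpa using hk
    have h3 : t[k].length = (t.map List.length)[k]'hk2 := by simp
    rw [h3, List.set_getElem_self]

theorem markG_true_pres (t : List (List Bool)) (p x : Int × Int)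
    (h : getG t x = some true) : getG (markG t p) x = some true := by
  cases hi : PySem.List.pyIdx? t.length p.1 with
  | none => rw [markG_of_none t p hi]; exact h
  | some k =>
    have hk := pyIdx_lt _ _ _ hi
    rw [markG_of_some t p k hi]
    unfold getG at h ⊢
    rw [pyGet?_set_of_lt t k hk _ x.1]
    by_cases hxk : PySem.List.pyIdx? t.length x.1 = some k
    · simp only [hxk, if_true, Option.bind_some]
      have hrowx : PySem.List.pyGet? t x.1 = some t[k] := by
        unfold PySem.List.pyGet?
        rw [hxk]
        simp [List.getElem?_eq_getElem, hk]
      rw [hrowx] at h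
      simp only [Option.bind_some] at h
      have hgd : t.getD k [] = t[k] := by
        rw [List.getD_eq_getElem?_getD, List.getElem?_eq_getElem hk]; rfl
      rw [hgd]
      cases hj : PySem.List.pyIdx? t[k].length p.2 with
      | none =>
        have : PySem.List.pySetD t[k] p.2 true = t[k] := by
          unfold PySem.List.pySetD PySem.List.pySet?
          rw [hj]; rfl
        rw [this]; exact h
      | some c =>
        have hc := pyIdx_lt _ _ _ hj
        have : PySem.List.pySetD t[k] p.2 true = t[k].set c true := by
          unfold PySem.List.pySetD PySem.List.pySet?
          rw [hj]; rfl
        rw [this, pyGet?_set_of_lt t[k] c hc true x.2]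
        split
        · rfl
        · exact h
    · simp only [hxk, if_false]
      exact h

theorem vstage_fc_le (boord : List (List String)) (f : List (List Bool) → Int × Int → List (Int × Int) × List (List Bool))
    (p q : Int × Int) (bnd : List (List Bool) → Prop) [∀ tc, Decidable (bnd tc)]
    (st : List (Int × Int) × List (List Bool))
    (hf : ∀ tc q', falseCount (f tc q').2 ≤ falseCount tc) :
    falseCount (vstage boord f p q bnd st).2 ≤ falseCount st.2 := by
  unfold vstage; split
  · exact hf st.2 q
  · exact le_refl _

theorem vstage_shape (boord : List (List String)) (f : List (List Bool) → Int × Int → List (Int × Int) × List (List Bool))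
    (p q : Int × Int) (bnd : List (List Bool) → Prop) [∀ tc, Decidable (bnd tc)]
    (st : List (Int × Int) × List (List Bool))
    (hf : ∀ tc q', ((f tc q').2).map List.length = tc.map List.length) :
    ((vstage boord f p q bnd st).2).map List.length = st.2.map List.length := by
  unfold vstage; split
  · exact hf st.2 q
  · rfl

theorem vstage_pres (boord : List (List String)) (f : List (List Bool) → Int × Int → List (Int × Int) × List (List Bool))
    (p q : Int × Int) (bnd : List (List Bool) → Prop) [∀ tc, Decidable (bnd tc)]
    (st : List (Int × Int) × List (List Bool))
    (hf : ∀ tc q' x, getG tc x = some true → getG ((f tc q').2) x = some true)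
    (x : Int × Int) (hx : getG st.2 x = some true) :
    getG ((vstage boord f p q bnd st).2) x = some true := by
  unfold vstage; split
  · exact hf st.2 q x hx
  · exact hx

theorem vstage_congr (boord : List (List String))
    (f g : List (List Bool) → Int × Int → List (Int × Int) × List (List Bool))
    (p q : Int × Int) (bnd : List (List Bool) → Prop) [∀ tc, Decidable (bnd tc)]
    (st : List (Int × Int) × List (List Bool))
    (hf : f st.2 q = g st.2 q) :
    vstage boord f p q bnd st = vstage boord g p q bnd st := by
  unfold vstage; rw [hf]

theorem vstage_acc (boord : List (List String))
    (f : List (List Bool) → Int × Int → List (Int × Int) × List (List Bool))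
    (p q : Int × Int) (bnd : List (List Bool) → Prop) [∀ tc, Decidable (bnd tc)]
    (xs : List (Int × Int)) (st : List (Int × Int) × List (List Bool)) :
    vstage boord f p q bnd (xs ++ st.1, st.2) =
      (xs ++ (vstage boord f p q bnd st).1, (vstage boord f p q bnd st).2) := by
  unfold vstage
  split <;> simp

theorem visitAF_fc_le (boord : List (List String)) :
    ∀ (n : Nat) (t : List (List Bool)) (p : Int × Int),
      falseCount (visitAF boord n t p).2 ≤ falseCount t := by
  intro n
  induction n with
  | zero => intro t p; simp [visitAF]
  | succ n ih =>
    intro t p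
    by_cases hcb : getG t p = some false ∧ getG boord p ≠ some " "
    · simp only [visitAF, if_pos hcb]
      refine le_trans (vstage_fc_le _ _ _ _ _ _ (fun tc q' => ih tc q'))
        (le_trans (vstage_fc_le _ _ _ _ _ _ (fun tc q' => ih tc q'))
          (le_trans (vstage_fc_le _ _ _ _ _ _ (fun tc q' => ih tc q'))
            (le_trans (vstage_fc_le _ _ _ _ _ _ (fun tc q' => ih tc q'))
              (le_of_lt (falseCount_markG_lt t p hcb.1)))))
    · simp [visitAF, hcb]

theorem visitAF_shape (boord : List (List String)) :
    ∀ (n : Nat) (t : List (List Bool)) (p : Int × Int),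
      ((visitAF boord n t p).2).map List.length = t.map List.length := by
  intro n
  induction n with
  | zero => intro t p; simp [visitAF]
  | succ n ih =>
    intro t p
    by_cases hcb : getG t p = some false ∧ getG boord p ≠ some " "
    · simp only [visitAF, if_pos hcb]
      refine Eq.trans (vstage_shape _ _ _ _ _ _ (fun tc q' => ih tc q'))
        (Eq.trans (vstage_shape _ _ _ _ _ _ (fun tc q' => ih tc q'))
          (Eq.trans (vstage_shape _ _ _ _ _ _ (fun tc q' => ih tc q'))
            (Eq.trans (vstage_shape _ _ _ _ _ _ (fun tc q' => ih tc q'))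
              (markG_shape t p))))
    · simp [visitAF, hcb]

theorem visitAF_pres (boord : List (List String)) :
    ∀ (n : Nat) (t : List (List Bool)) (p : Int × Int) (x : Int × Int),
      getG t x = some true → getG ((visitAF boord n t p).2) x = some true := by
  intro n
  induction n with
  | zero => intro t p x hx; simpa [visitAF] using hx
  | succ n ih =>
    intro t p x hx
    by_cases hcb : getG t p = some false ∧ getG boord p ≠ some " "
    · simp only [visitAF, if_pos hcb]
      refine vstage_pres _ _ _ _ _ _ (fun tc q' y hy => ih tc q' y hy) x
        (vstage_pres _ _ _ _ _ _ (fun tc q' y hy => ih tc q' y hy) x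
          (vstage_pres _ _ _ _ _ _ (fun tc q' y hy => ih tc q' y hy) x
            (vstage_pres _ _ _ _ _ _ (fun tc q' y hy => ih tc q' y hy) x
              (markG_true_pres t p x hx))))
    · simpa [visitAF, hcb] using hx

theorem visitAF_zero_fc (boord : List (List String)) (t : List (List Bool)) (p : Int × Int)
    (h : falseCount t = 0) (n : Nat) : visitAF boord n t p = ([], t) := by
  cases n with
  | zero => rfl
  | succ n =>
    have hcb : ¬ (getG t p = some false ∧ getG boord p ≠ some " ") := by
      rintro ⟨hc, -⟩
      have := getG_false_pos t p hc
      omega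
    simp [visitAF, hcb]

theorem visitAF_irrel (boord : List (List String)) :
    ∀ (m : Nat) (m' : Nat) (t : List (List Bool)) (p : Int × Int),
      falseCount t ≤ m → falseCount t ≤ m' →
      visitAF boord m t p = visitAF boord m' t p := by
  intro m
  induction m with
  | zero =>
    intro m' t p hm hm'
    have h0 : falseCount t = 0 := Nat.le_zero.mp hm
    rw [visitAF_zero_fc boord t p h0, visitAF_zero_fc boord t p h0]
  | succ m ih =>
    intro m' t p hm hm'
    cases m' with
    | zero =>
      have h0 : falseCount t = 0 := Nat.le_zero.mp hm'
      rw [visitAF_zero_fc boord t p h0, visitAF_zero_fc boord t p h0]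
    | succ m' =>
      by_cases hcb : getG t p = some false ∧ getG boord p ≠ some " "
      · have hlt1 := falseCount_markG_lt t p hcb.1
        simp only [visitAF, if_pos hcb]
        have hfc1 : falseCount (markG t p) ≤ m := by omega
        have hfc1' : falseCount (markG t p) ≤ m' := by omega
        have e1 : vstage boord (visitAF boord m) p (p.1 + 1, p.2) (fun tc => ((tc.length : Int)) > p.1 + 1) ([p], markG t p)
            = vstage boord (visitAF boord m') p (p.1 + 1, p.2) (fun tc => ((tc.length : Int)) > p.1 + 1) ([p], markG t p) :=
          vstage_congr _ _ _ _ _ _ _ (ih m' (markG t p) _ hfc1 hfc1')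
        rw [e1]
        set E1 := vstage boord (visitAF boord m') p (p.1 + 1, p.2) (fun tc => ((tc.length : Int)) > p.1 + 1) ([p], markG t p) with hE1
        have hfcE1 : falseCount E1.2 ≤ falseCount (markG t p) := by
          rw [hE1]; exact vstage_fc_le _ _ _ _ _ _ (fun tc q' => visitAF_fc_le boord m' tc q')
        have e2 : vstage boord (visitAF boord m) p (p.1, p.2 + 1) (fun tc => ((tc.headD []).length : Int) > p.2 + 1) E1
            = vstage boord (visitAF boord m') p (p.1, p.2 + 1) (fun tc => ((tc.headD []).length : Int) > p.2 + 1) E1 :=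
          vstage_congr _ _ _ _ _ _ _ (ih m' E1.2 _ (by omega) (by omega))
        rw [e2]
        set E2 := vstage boord (visitAF boord m') p (p.1, p.2 + 1) (fun tc => ((tc.headD []).length : Int) > p.2 + 1) E1 with hE2
        have hfcE2 : falseCount E2.2 ≤ falseCount E1.2 := by
          rw [hE2]; exact vstage_fc_le _ _ _ _ _ _ (fun tc q' => visitAF_fc_le boord m' tc q')
        have e3 : vstage boord (visitAF boord m) p (p.1, p.2 - 1) (fun _ => p.2 - 1 ≥ 0) E2
            = vstage boord (visitAF boord m') p (p.1, p.2 - 1) (fun _ => p.2 - 1 ≥ 0) E2 :=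
          vstage_congr _ _ _ _ _ _ _ (ih m' E2.2 _ (by omega) (by omega))
        rw [e3]
        set E3 := vstage boord (visitAF boord m') p (p.1, p.2 - 1) (fun _ => p.2 - 1 ≥ 0) E2 with hE3
        have hfcE3 : falseCount E3.2 ≤ falseCount E2.2 := by
          rw [hE3]; exact vstage_fc_le _ _ _ _ _ _ (fun tc q' => visitAF_fc_le boord m' tc q')
        have e4 : vstage boord (visitAF boord m) p (p.1 - 1, p.2) (fun _ => p.1 - 1 ≥ 0) E3
            = vstage boord (visitAF boord m') p (p.1 - 1, p.2) (fun _ => p.1 - 1 ≥ 0) E3 :=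
          vstage_congr _ _ _ _ _ _ _ (ih m' E3.2 _ (by omega) (by omega))
        rw [e4]
      · simp only [visitAF, if_neg hcb]

theorem visitA_fc_le (boord : List (List String)) (t : List (List Bool)) (p : Int × Int) :
    falseCount (visitA boord t p).2 ≤ falseCount t :=
  visitAF_fc_le boord _ t p

theorem visitA_shape (boord : List (List String)) (t : List (List Bool)) (p : Int × Int) :
    ((visitA boord t p).2).map List.length = t.map List.length :=
  visitAF_shape boord _ t p

theorem visitA_pres (boord : List (List String)) (t : List (List Bool)) (p x : Int × Int)
    (hx : getG t x = some true) : getG ((visitA boord t p).2) x = some true :=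
  visitAF_pres boord _ t p x hx

theorem visitA_skip (boord : List (List String)) (t : List (List Bool)) (p : Int × Int)
    (h : ¬ (getG t p = some false ∧ getG boord p ≠ some " ")) : visitA boord t p = ([], t) := by
  unfold visitA
  cases hfc : falseCount t with
  | zero => rfl
  | succ n => simp [visitAF, h]

theorem visitA_visit (boord : List (List String)) (t : List (List Bool)) (p : Int × Int)
    (hc : getG t p = some false) (hb : getG boord p ≠ some " ") :
    visitA boord t p =
      vstage boord (visitA boord) p (p.1 - 1, p.2) (fun _ => p.1 - 1 ≥ 0)
        (vstage boord (visitA boord) p (p.1, p.2 - 1) (fun _ => p.2 - 1 ≥ 0)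
          (vstage boord (visitA boord) p (p.1, p.2 + 1) (fun tc => ((tc.headD []).length : Int) > p.2 + 1)
            (vstage boord (visitA boord) p (p.1 + 1, p.2) (fun tc => ((tc.length : Int)) > p.1 + 1)
              ([p], markG t p)))) := by
  obtain ⟨n, hn⟩ : ∃ n, falseCount t = n + 1 := by
    have := getG_false_pos t p hc
    exact ⟨falseCount t - 1, by omega⟩
  have hlt1 := falseCount_markG_lt t p hc
  unfold visitA
  rw [hn]
  simp only [visitAF, if_pos (And.intro hc hb)]
  have hfc1 : falseCount (markG t p) ≤ n := by omega
  have e1 : vstage boord (visitAF boord n) p (p.1 + 1, p.2) (fun tc => ((tc.length : Int)) > p.1 + 1) ([p], markG t p)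
      = vstage boord (visitA boord) p (p.1 + 1, p.2) (fun tc => ((tc.length : Int)) > p.1 + 1) ([p], markG t p) :=
    vstage_congr _ _ _ _ _ _ _ (visitAF_irrel boord n (falseCount (markG t p)) _ _ hfc1 le_rfl)
  rw [e1]
  set E1 := vstage boord (visitA boord) p (p.1 + 1, p.2) (fun tc => ((tc.length : Int)) > p.1 + 1) ([p], markG t p) with hE1
  have hfcE1 : falseCount E1.2 ≤ falseCount (markG t p) := by
    rw [hE1]; exact vstage_fc_le _ _ _ _ _ _ (fun tc q' => visitA_fc_le boord tc q')
  have e2 : vstage boord (visitAF boord n) p (p.1, p.2 + 1) (fun tc => ((tc.headD []).length : Int) > p.2 + 1) E1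
      = vstage boord (visitA boord) p (p.1, p.2 + 1) (fun tc => ((tc.headD []).length : Int) > p.2 + 1) E1 :=
    vstage_congr _ _ _ _ _ _ _ (visitAF_irrel boord n (falseCount E1.2) _ _ (by omega) le_rfl)
  rw [e2]
  set E2 := vstage boord (visitA boord) p (p.1, p.2 + 1) (fun tc => ((tc.headD []).length : Int) > p.2 + 1) E1 with hE2
  have hfcE2 : falseCount E2.2 ≤ falseCount E1.2 := by
    rw [hE2]; exact vstage_fc_le _ _ _ _ _ _ (fun tc q' => visitA_fc_le boord tc q')
  have e3 : vstage boord (visitAF boord n) p (p.1, p.2 - 1) (fun _ => p.2 - 1 ≥ 0) E2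
      = vstage boord (visitA boord) p (p.1, p.2 - 1) (fun _ => p.2 - 1 ≥ 0) E2 :=
    vstage_congr _ _ _ _ _ _ _ (visitAF_irrel boord n (falseCount E2.2) _ _ (by omega) le_rfl)
  rw [e3]
  set E3 := vstage boord (visitA boord) p (p.1, p.2 - 1) (fun _ => p.2 - 1 ≥ 0) E2 with hE3
  have hfcE3 : falseCount E3.2 ≤ falseCount E2.2 := by
    rw [hE3]; exact vstage_fc_le _ _ _ _ _ _ (fun tc q' => visitA_fc_le boord tc q')
  have e4 : vstage boord (visitAF boord n) p (p.1 - 1, p.2) (fun _ => p.1 - 1 ≥ 0) E3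
      = vstage boord (visitA boord) p (p.1 - 1, p.2) (fun _ => p.1 - 1 ≥ 0) E3 :=
    vstage_congr _ _ _ _ _ _ _ (visitAF_irrel boord n (falseCount E3.2) _ _ (by omega) le_rfl)
  rw [e4]
  rfl

def procAll (boord : List (List String)) : List (List Bool) → List (Int × Int) → List (Int × Int) → List (Int × Int) × List (List Bool)
  | t, [], acc => (acc, t)
  | t, q :: qs, acc => procAll boord (visitA boord t q).2 qs (acc ++ (visitA boord t q).1)

theorem procAll_append (boord : List (List String)) (xs ys : List (Int × Int)) :
    ∀ (t : List (List Bool)) (acc : List (Int × Int)),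
      procAll boord t (xs ++ ys) acc = procAll boord (procAll boord t xs acc).2 ys (procAll boord t xs acc).1 := by
  induction xs with
  | nil => intro t acc; rfl
  | cons q qs ih =>
    intro t acc
    simp only [List.cons_append, procAll]
    exact ih _ _

theorem runB_nil (boord : List (List String)) (rows width : Int) (t : List (List Bool)) (acc : List (Int × Int)) :
    runB boord rows width t [] acc = (acc, t) := by
  rw [runB]

theorem runB_cons_notfalse (boord : List (List String)) (rows width : Int) (t : List (List Bool))
    (p : Int × Int) (s acc : List (Int × Int)) (hc : ¬ getG t p = some false) :
    runB boord rows width t (p :: s) acc = runB boord rows width t s acc := by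
  rw [runB]; simp [hc]

theorem runB_cons_space (boord : List (List String)) (rows width : Int) (t : List (List Bool))
    (p : Int × Int) (s acc : List (Int × Int)) (hc : getG t p = some false)
    (hb : getG boord p = some " ") :
    runB boord rows width t (p :: s) acc = runB boord rows width t s acc := by
  rw [runB]; simp [hc, hb]

theorem runB_cons_visit (boord : List (List String)) (rows width : Int) (t : List (List Bool))
    (p : Int × Int) (s acc : List (Int × Int)) (ch : String) (hc : getG t p = some false)
    (hb : getG boord p = some ch) (hsp : ch ≠ " ") :
    runB boord rows width t (p :: s) acc =
      runB boord rows width (markG t p)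
        ((pushIf (p.1 + 1 < rows ∧ getG (markG t p) (p.1 + 1, p.2) = some false ∧ getG boord (p.1 + 1, p.2) = some ch) (p.1 + 1, p.2) ++
          pushIf (p.2 + 1 < width ∧ getG (markG t p) (p.1, p.2 + 1) = some false ∧ getG boord (p.1, p.2 + 1) = some ch) (p.1, p.2 + 1) ++
          pushIf (p.2 - 1 ≥ 0 ∧ getG (markG t p) (p.1, p.2 - 1) = some false ∧ getG boord (p.1, p.2 - 1) = some ch) (p.1, p.2 - 1) ++
          pushIf (p.1 - 1 ≥ 0 ∧ getG (markG t p) (p.1 - 1, p.2) = some false ∧ getG boord (p.1 - 1, p.2) = some ch) (p.1 - 1, p.2)) ++ s)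
        (acc ++ [p]) := by
  rw [runB]; simp [hc, hb, hsp]

theorem step1 (boord : List (List String)) (p q : Int × Int) (ch : String)
    (bnd : List (List Bool) → Prop) [∀ tc, Decidable (bnd tc)] (bB : Prop) [Decidable bB]
    (t1 tcur : List (List Bool)) (a : List (Int × Int))
    (hiff : bnd tcur ↔ bB)
    (hpres : ∀ x, getG t1 x = some true → getG tcur x = some true)
    (hshape : tcur.map List.length = t1.map List.length)
    (hch : getG boord p = some ch) :
    procAll boord tcur (pushIf (bB ∧ getG t1 q = some false ∧ getG boord q = some ch) q) a
      = vstage boord (visitA boord) p q bnd (a, tcur) := by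
  by_cases hcb : bB ∧ getG t1 q = some false ∧ getG boord q = some ch
  · simp only [pushIf, if_pos hcb]
    have hL : procAll boord tcur [q] a = (a ++ (visitA boord tcur q).1, (visitA boord tcur q).2) := by
      simp [procAll]
    rw [hL]
    cases htq : getG tcur q with
    | none =>
      exfalso
      have hn : getG t1 q = none := (getG_none_iff hshape q).mp htq
      have h2 := hcb.2.1
      rw [hn] at h2; simp at h2
    | some b =>
      cases b with
      | false =>
        have hca : bnd tcur ∧ getG tcur q = some false ∧ getG boord p = getG boord q :=
          ⟨hiff.mpr hcb.1, htq, by rw [hch, hcb.2.2]⟩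
        unfold vstage
        rw [if_pos hca]
      | true =>
        have hskip : visitA boord tcur q = ([], tcur) := by
          apply visitA_skip
          rintro ⟨h2, -⟩
          rw [htq] at h2; simp at h2
        have hca : ¬ (bnd tcur ∧ getG tcur q = some false ∧ getG boord p = getG boord q) := by
          rintro ⟨-, h2, -⟩
          rw [htq] at h2; simp at h2
        unfold vstage
        rw [if_neg hca, hskip]
        simp
  · simp only [pushIf, if_neg hcb]
    have hca : ¬ (bnd tcur ∧ getG tcur q = some false ∧ getG boord p = getG boord q) := by
      rintro ⟨hb1, hb2, hb3⟩
      apply hcb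
      refine ⟨hiff.mp hb1, ?_, by rw [← hb3, hch]⟩
      cases ht1q : getG t1 q with
      | none =>
        exfalso
        have hn : getG tcur q = none := (getG_none_iff hshape q).mpr ht1q
        rw [hn] at hb2; simp at hb2
      | some b =>
        cases b with
        | false => rfl
        | true =>
          exfalso
          have hp := hpres q ht1q
          rw [hb2] at hp; simp at hp
    unfold vstage
    rw [if_neg hca]
    simp [procAll]

theorem vstage_acc' (boord : List (List String))
    (f : List (List Bool) → Int × Int → List (Int × Int) × List (List Bool))
    (p q : Int × Int) (bnd : List (List Bool) → Prop) [∀ tc, Decidable (bnd tc)]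
    (xs a : List (Int × Int)) (tc : List (List Bool)) :
    vstage boord f p q bnd (xs ++ a, tc) =
      (xs ++ (vstage boord f p q bnd (a, tc)).1, (vstage boord f p q bnd (a, tc)).2) :=
  vstage_acc boord f p q bnd xs (a, tc)

theorem sim (boord : List (List String)) :
    ∀ (m : Nat) (t : List (List Bool)) (qs acc : List (Int × Int)),
      5 * falseCount t + qs.length ≤ m →
      t.map List.length = boord.map List.length →
      runB boord (boord.length : Int) ((boord.headD []).length : Int) t qs acc = procAll boord t qs acc := by
  intro m
  induction m with
  | zero =>
    intro t qs acc hm ht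
    cases qs with
    | nil => rw [runB_nil]; rfl
    | cons p s => simp at hm
  | succ m ih =>
    intro t qs acc hm ht
    cases qs with
    | nil => rw [runB_nil]; rfl
    | cons p s =>
      by_cases hc : getG t p = some false
      · obtain ⟨ch, hch⟩ := getG_some_of_shape ht hc
        by_cases hsp : ch = " "
        · subst hsp
          rw [runB_cons_space _ _ _ _ _ _ _ hc hch]
          rw [ih t s acc (by simp only [List.length_cons] at hm; omega) ht]
          have hskip : visitA boord t p = ([], t) := by
            apply visitA_skip
            rintro ⟨-, hb⟩
            exact hb hch
          simp [procAll, hskip]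
        · have hb' : getG boord p ≠ some " " := by
            rw [hch]; intro hcon; exact hsp (Option.some.inj hcon)
          rw [runB_cons_visit _ _ _ _ _ _ _ _ hc hch hsp]
          have hlt1 := falseCount_markG_lt t p hc
          have hsh1 : (markG t p).map List.length = t.map List.length := markG_shape t p
          set N1 := pushIf (p.1 + 1 < (boord.length : Int) ∧ getG (markG t p) (p.1 + 1, p.2) = some false ∧ getG boord (p.1 + 1, p.2) = some ch) (p.1 + 1, p.2) with hN1
          set N2 := pushIf (p.2 + 1 < ((boord.headD []).length : Int) ∧ getG (markG t p) (p.1, p.2 + 1) = some false ∧ getG boord (p.1, p.2 + 1) = some ch) (p.1, p.2 + 1) with hN2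
          set N3 := pushIf (p.2 - 1 ≥ 0 ∧ getG (markG t p) (p.1, p.2 - 1) = some false ∧ getG boord (p.1, p.2 - 1) = some ch) (p.1, p.2 - 1) with hN3
          set N4 := pushIf (p.1 - 1 ≥ 0 ∧ getG (markG t p) (p.1 - 1, p.2) = some false ∧ getG boord (p.1 - 1, p.2) = some ch) (p.1 - 1, p.2) with hN4
          have hm' : 5 * falseCount (markG t p) + ((N1 ++ N2 ++ N3 ++ N4) ++ s).length ≤ m := by
            have h1 : N1.length ≤ 1 := by rw [hN1]; exact length_pushIf _ _
            have h2 : N2.length ≤ 1 := by rw [hN2]; exact length_pushIf _ _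
            have h3 : N3.length ≤ 1 := by rw [hN3]; exact length_pushIf _ _
            have h4 : N4.length ≤ 1 := by rw [hN4]; exact length_pushIf _ _
            simp only [List.length_append, List.length_cons] at hm ⊢
            omega
          rw [ih _ _ _ hm' (hsh1.trans ht)]
          suffices hN : procAll boord (markG t p) (N1 ++ N2 ++ N3 ++ N4) (acc ++ [p]) = (acc ++ (visitA boord t p).1, (visitA boord t p).2) by
            rw [procAll_append boord (N1 ++ N2 ++ N3 ++ N4) s, hN]
            simp [procAll]
          rw [visitA_visit boord t p hc hb']
          rw [procAll_append boord (N1 ++ N2 ++ N3) N4, procAll_append boord (N1 ++ N2) N3, procAll_append boord N1 N2]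
          have s1 : procAll boord (markG t p) N1 (acc ++ [p]) = vstage boord (visitA boord) p (p.1 + 1, p.2) (fun tc => ((tc.length : Int)) > p.1 + 1) (acc ++ [p], markG t p) := by
            rw [hN1]
            refine step1 boord p (p.1 + 1, p.2) ch _ _ (markG t p) (markG t p) (acc ++ [p]) ?_ (fun x h => h) rfl hch
            rw [gt_iff_lt]
            have hlen : ((markG t p).length : Int) = (boord.length : Int) := by
              exact_mod_cast shape_length (hsh1.trans ht)
            rw [hlen]
          rw [s1]
          set T1 := vstage boord (visitA boord) p (p.1 + 1, p.2) (fun tc => ((tc.length : Int)) > p.1 + 1) (acc ++ [p], markG t p) with hT1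
          have hshT1 : T1.2.map List.length = (markG t p).map List.length := by
            rw [hT1]; exact vstage_shape _ _ _ _ _ _ (fun tc q' => visitA_shape boord tc q')
          have hprT1 : ∀ x, getG (markG t p) x = some true → getG T1.2 x = some true := by
            intro x hx; rw [hT1]
            exact vstage_pres _ _ _ _ _ _ (fun tc q' y hy => visitA_pres boord tc q' y hy) x hx
          have s2 : procAll boord T1.2 N2 T1.1 = vstage boord (visitA boord) p (p.1, p.2 + 1) (fun tc => ((tc.headD []).length : Int) > p.2 + 1) (T1.1, T1.2) := by
            rw [hN2]
            refine step1 boord p (p.1, p.2 + 1) ch _ _ (markG t p) T1.2 T1.1 ?_ hprT1 hshT1 hch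
            rw [gt_iff_lt]
            have hw : ((T1.2.headD []).length : Int) = ((boord.headD []).length : Int) := by
              exact_mod_cast shape_headD (hshT1.trans (hsh1.trans ht))
            rw [hw]
          rw [s2]
          set T2 := vstage boord (visitA boord) p (p.1, p.2 + 1) (fun tc => ((tc.headD []).length : Int) > p.2 + 1) (T1.1, T1.2) with hT2
          have hshT2 : T2.2.map List.length = (markG t p).map List.length := by
            rw [hT2]
            exact (vstage_shape _ _ _ _ _ _ (fun tc q' => visitA_shape boord tc q')).trans hshT1
          have hprT2 : ∀ x, getG (markG t p) x = some true → getG T2.2 x = some true := by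
            intro x hx; rw [hT2]
            exact vstage_pres _ _ _ _ _ _ (fun tc q' y hy => visitA_pres boord tc q' y hy) x (hprT1 x hx)
          have s3 : procAll boord T2.2 N3 T2.1 = vstage boord (visitA boord) p (p.1, p.2 - 1) (fun _ => p.2 - 1 ≥ 0) (T2.1, T2.2) := by
            rw [hN3]
            exact step1 boord p (p.1, p.2 - 1) ch _ _ (markG t p) T2.2 T2.1 Iff.rfl hprT2 hshT2 hch
          rw [s3]
          set T3 := vstage boord (visitA boord) p (p.1, p.2 - 1) (fun _ => p.2 - 1 ≥ 0) (T2.1, T2.2) with hT3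
          have hshT3 : T3.2.map List.length = (markG t p).map List.length := by
            rw [hT3]
            exact (vstage_shape _ _ _ _ _ _ (fun tc q' => visitA_shape boord tc q')).trans hshT2
          have hprT3 : ∀ x, getG (markG t p) x = some true → getG T3.2 x = some true := by
            intro x hx; rw [hT3]
            exact vstage_pres _ _ _ _ _ _ (fun tc q' y hy => visitA_pres boord tc q' y hy) x (hprT2 x hx)
          have s4 : procAll boord T3.2 N4 T3.1 = vstage boord (visitA boord) p (p.1 - 1, p.2) (fun _ => p.1 - 1 ≥ 0) (T3.1, T3.2) := by
            rw [hN4]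
            exact step1 boord p (p.1 - 1, p.2) ch _ _ (markG t p) T3.2 T3.1 Iff.rfl hprT3 hshT3 hch
          rw [s4]
          simp only [hT3, hT2, hT1, vstage_acc', Prod.mk.eta]
      · rw [runB_cons_notfalse _ _ _ _ _ _ _ hc]
        rw [ih t s acc (by simp only [List.length_cons] at hm; omega) ht]
        have hskip : visitA boord t p = ([], t) := by
          apply visitA_skip
          rintro ⟨h2, -⟩
          exact hc h2
        simp [procAll, hskip]

theorem foldl_congr_inv {σ α : Type} (Inv : σ → Prop) (f g : σ → α → σ) :
    ∀ (l : List α) (s : σ), Inv s →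
      (∀ s' x, Inv s' → x ∈ l → f s' x = g s' x ∧ Inv (f s' x)) →
      l.foldl f s = l.foldl g s ∧ Inv (l.foldl f s) := by
  intro l
  induction l with
  | nil => intro s hs _; exact ⟨rfl, hs⟩
  | cons x xs ih =>
    intro s hs hfg
    obtain ⟨he, hi⟩ := hfg s x hs (by simp)
    simp only [List.foldl_cons]
    have hrest := ih (f s x) hi (fun s' y hy hmem => hfg s' y hy (by simp [hmem]))
    exact ⟨hrest.1.trans (by rw [he]), hrest.2⟩

-- ===== VERDICT (by name: the statement is the Claim_ definition above) =====
theorem findPosibilities_spec : Claim_equal_findPosibilities := by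
  intro boord letter _hdom hpre
  unfold Spec_findPosibilities findPosibilities findPosibilities_alt
  dsimp only
  have ht0 : (boord.map (fun _ => (boord.headD []).map (fun _ => false)))
      = boord.map (fun _ => List.replicate (boord.headD []).length false) := by
    have hrow : ((boord.headD [] : List String)).map (fun _ => false)
        = List.replicate (boord.headD []).length false := by
      simp [List.map_const']
    rw [hrow]
  rw [ht0]
  have hInv0 : (boord.map (fun _ => List.replicate (boord.headD []).length false)).map List.length
      = boord.map List.length := by
    rw [List.map_map]
    apply List.map_congr_left
    intro row hrow
    simp [hpre row hrow]
  apply congrArg Prod.fst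
  refine (foldl_congr_inv (fun (st : List (List (Int × Int)) × List (List Bool)) => st.2.map List.length = boord.map List.length) _ _ _ _ hInv0 ?_).1
  intro st i hst _hmem
  refine foldl_congr_inv (fun (st : List (List (Int × Int)) × List (List Bool)) => st.2.map List.length = boord.map List.length) _ _ _ _ hst ?_
  intro st2 j hst2 _hmem2
  have hrun : runB boord (boord.length : Int) ((boord.headD []).length : Int) st2.2 [(i, j)] []
      = procAll boord st2.2 [(i, j)] [] :=
    sim boord (5 * falseCount st2.2 + 1) st2.2 [(i, j)] [] (by simp) hst2
  have hproc : procAll boord st2.2 [(i, j)] []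
      = ((visitA boord st2.2 (i, j)).1, (visitA boord st2.2 (i, j)).2) := by
    simp [procAll]
  constructor
  · rw [hrun, hproc]
  · exact (visitA_shape boord st2.2 (i, j)).trans hst2
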